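"""Generate the `attribute [pysem] …` block at the end of PySem.lean: every public theorem of PySemCore.lean and PySem.lean
except the DENYLIST of rw-only definitional unfolders. usage: python pysem_names.py PySemCore.lean PySem.lean  (prints the block).

Why a denylist: `simp` rewrites a term's arguments before the term itself, so an UNCONDITIONAL equation whose left side is a bare
primitive application (`slice xs (some a) none`, `Set.update s xs`, `sorted xs key false`, …) and whose right side is its
definition / a foldl / an if-then-else rewrites the primitive away before any lemma ABOUT the primitive (mem_update, length_sorted,
mem_pyRange_one, …) can match — inside a simp set such a lemma disables its own companions. They stay citable by name (rw / simp only
[that lemma]); they just do not ride along in `simp only [pysem]`.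
"""

import re
import sys

DENYLIST = {
    # List: range/slice/enumerate/sorted unfolders
    "PySem.List.pyRange_one", "PySem.List.pyRange_zero", "PySem.List.pyRange_zero_nat", "PySem.List.slice_some_none",
    "PySem.List.enumerate_eq_zipIdx_map", "PySem.List.sorted_eq_foldl_insertBy", "PySem.List.sorted_rev_eq_foldl_insertBy",
    "PySem.List.pyGet?_eq_getElem?_toNat",
    # Set: the foldl / filter spellings of ofList, update, union, add
    "PySem.Set.ofList_eq_foldl", "PySem.Set.update_eq_foldl", "PySem.Set.union_eq_update", "PySem.Set.add_eq_ite",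
    "PySem.Set.update_eq_append_filter", "PySem.Set.ofList_cons_eq_update",
    # Dict: getD through get?, counter as its loop, items after insert as an if
    "PySem.Dict.getD_eq_get?_getD",
    "PySem.Dict.contains_eq_isSome_get?",  # cycles with get?_eq_none_iff_contains + Option.isSome_eq_false_iff "PySem.Dict.counter_eq_foldl", "PySem.Dict.items_insert",
    # pack 6: general-step range / length unfolders (would pre-empt the step-1 lemmas), powMod / permutations unfolders, the getD / getElem
    # bridges at 0 ≤ i (pyGetD_eq_getElem keeps the root normal form), max? as some-maxD, len against String.length
    "PySem.List.pyRange_of_pos", "PySem.List.pyRange_of_neg", "PySem.List.pyRange_zero_natCast", "PySem.List.length_pyRange_of_pos",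
    "PySem.List.length_pyRange_of_neg", "PySem.Int.powMod_eq", "PySem.List.permutations_succ", "PySem.List.pyGetD_of_nonneg",
    "PySem.List.pyGetD_map_of_nonneg", "PySem.List.getD_eq_getElem_of_lt", "PySem.List.max?_eq_some_maxD", "PySem.List.min?_eq_some_minD",
    "PySem.Str.len_eq_length", "PySem.List.bisectLeftLoop_spec", "PySem.List.bisectRightLoop_spec",
    # // and % at 0 ≤ b: simp proves 0 ≤ ↑n for any Nat-cast divisor and would unfold floordiv/mod to core / and % before floordiv_mul_add_mod etc. match
    "PySem.Int.floordiv_of_nonneg", "PySem.Int.mod_of_nonneg", "PySem.Int.powMod_eq_emod",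
}  # fmt: skip

DECL = re.compile(
    r"(?:omit\s+(?:\[[^\]]*\]\s*)+in\s+)?(?:@\[[^\]]*\]\s*)?(?:protected\s+)?(?:theorem|lemma)\s+([\w.'?!₀-₉]+)"
)


def names(paths):
    out = []
    for fn in paths:
        ns = []
        for line in open(fn, encoding="utf-8"):
            s = line.strip()
            if m := re.match(r"namespace\s+([\w.']+)", s):
                ns.append(m.group(1))
            elif (
                (m := re.match(r"end\s+([\w.']+)\s*$", s))
                and ns
                and ns[-1] == m.group(1)
            ):
                ns.pop()
            elif (m := DECL.match(s)) and not s.startswith("private"):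
                full = ".".join(ns + [m.group(1)])
                if full not in DENYLIST:
                    out.append(full)
    return out


def block(ns, width=118):
    lines, cur = [], "attribute [pysem]"
    for n in ns:
        if len(cur) + 1 + len(n) > width:
            lines.append(cur)
            cur = "  " + n
        else:
            cur += " " + n
    lines.append(cur)
    return "\n".join(lines)


if __name__ == "__main__":
    ns = names(sys.argv[1:])
    print(block(ns))
    print(f"-- {len(ns)} names", file=sys.stderr)
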